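-- pv_equiv track=rewrite | github.com/whdii/TMM | attack/textAttack.py | _get_replace_texts_and_available_substitutes
-- ===== SOURCE A (Python) =====
-- import copy
--
-- filter_words = set(['a', '.', '-', 'a the', '/', '?', '"', ',', 'b', '&', '!',
--                 '@', '%', '^', '*', '(', ')', "-", '-', '+', '=', '<', '>', '|', ':', ";", '～', '·'])
--
-- def _get_replace_texts_and_available_substitutes(substitutes, final_words, top_index, tgt_word):
--     replace_texts = []
--     available_substitutes = [tgt_word]
--     for substitute_ in substitutes:
--         substitute = substitute_
--
--         if substitute == tgt_word:
--             continue
--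
--         if '##' in substitute:
--             substitute = substitute.replace('##', '')
--
--         if substitute in filter_words:
--             continue
--
--         temp_replace = copy.deepcopy(final_words)
--         temp_replace[top_index] = substitute
--         available_substitutes.append(substitute)
--         replace_texts.append(' '.join(temp_replace))
--     return replace_texts, available_substitutes
-- ===== SOURCE B (Python) =====
-- filter_words = set(['a', '.', '-', 'a the', '/', '?', '"', ',', 'b', '&', '!',
--                 '@', '%', '^', '*', '(', ')', "-", '-', '+', '=', '<', '>', '|', ':', ";", '～', '·'])
--
-- def _get_replace_texts_and_available_substitutes(substitutes, final_words, top_index, tgt_word):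
--     n = len(final_words)
--     i = top_index + n if top_index < 0 else top_index
--     head = ' '.join(final_words[:i]) + ' ' if i > 0 else ''
--     tail = ' ' + ' '.join(final_words[i + 1:]) if i + 1 < n else ''
--     replace_texts = []
--     available_substitutes = [tgt_word]
--     for s in substitutes:
--         if s == tgt_word:
--             continue
--         s = s.replace('##', '')
--         if s in filter_words:
--             continue
--         replace_texts.append(head + s + tail)
--         available_substitutes.append(s)
--     return replace_texts, available_substitutes
-- ===== Notes on version B (the rewrite author's own statement) =====
-- stated objective: faster
-- what changed: B joins the two sentence halves into prefix/suffix strings once before the loop and builds each replacement by three-way concatenation, instead of deep-copying final_words and re-joining the whole word list for every substitute.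
import Mathlib
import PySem

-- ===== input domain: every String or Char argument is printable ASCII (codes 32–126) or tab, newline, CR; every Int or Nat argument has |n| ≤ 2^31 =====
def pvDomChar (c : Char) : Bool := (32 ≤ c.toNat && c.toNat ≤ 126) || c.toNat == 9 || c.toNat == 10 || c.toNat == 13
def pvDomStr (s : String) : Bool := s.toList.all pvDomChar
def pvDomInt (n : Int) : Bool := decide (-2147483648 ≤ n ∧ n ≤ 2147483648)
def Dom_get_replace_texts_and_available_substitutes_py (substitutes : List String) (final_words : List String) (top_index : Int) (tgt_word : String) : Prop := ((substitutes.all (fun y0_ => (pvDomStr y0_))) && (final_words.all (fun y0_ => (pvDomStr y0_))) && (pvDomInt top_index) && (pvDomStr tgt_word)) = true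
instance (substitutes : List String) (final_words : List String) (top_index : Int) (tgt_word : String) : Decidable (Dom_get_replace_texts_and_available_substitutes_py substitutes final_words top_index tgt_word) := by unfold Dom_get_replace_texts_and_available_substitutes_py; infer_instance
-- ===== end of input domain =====

-- B precomputes the joined sentence halves once before the loop instead of deep-copying
-- final_words and re-joining the whole list for every substitute (objective: faster, constant-factor).

-- module constant 'filter_words' (shared context of both implementations)
def pvFilterWords : PySem.Set String := PySem.Set.ofList ["a", ".", "-", "a the", "/", "?", "\"", ",", "b", "&", "!",
  "@", "%", "^", "*", "(", ")", "-", "-", "+", "=", "<", ">", "|", ":", ";", "～", "·"]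

-- ===== PORT A =====
def get_replace_texts_and_available_substitutes_py (substitutes : List String) (final_words : List String) (top_index : Int) (tgt_word : String) : List String × List String :=
  substitutes.foldl (fun acc substitute_ =>
    let substitute := substitute_
    if substitute == tgt_word then acc
    else
      let substitute := if PySem.Str.isIn "##" substitute then PySem.Str.replace substitute "##" "" else substitute
      if PySem.Set.contains pvFilterWords substitute then acc
      else
        -- temp_replace = deepcopy(final_words); temp_replace[top_index] = substitute  (IndexError excluded by Pre_)
        let temp_replace := PySem.List.pySetD final_words top_index substitute
        (acc.1 ++ [PySem.Str.join " " temp_replace], acc.2 ++ [substitute]))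
    ([], [tgt_word])

-- ===== PORT B =====
def get_replace_texts_and_available_substitutes_py_alt (substitutes : List String) (final_words : List String) (top_index : Int) (tgt_word : String) : List String × List String :=
  let n : Int := final_words.length
  let i : Int := if top_index < 0 then top_index + n else top_index
  let head : String := if 0 < i then PySem.Str.join " " (PySem.List.slice final_words none (some i)) ++ " " else ""
  let tail : String := if i + 1 < n then " " ++ PySem.Str.join " " (PySem.List.slice final_words (some (i + 1)) none) else ""
  substitutes.foldl (fun acc s =>
    if s == tgt_word then acc
    else
      let s := PySem.Str.replace s "##" ""
      if PySem.Set.contains pvFilterWords s then acc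
      else (acc.1 ++ [head ++ s ++ tail], acc.2 ++ [s]))
    ([], [tgt_word])

-- ===== PRECONDITION & SPEC =====
-- Pre_ excludes exactly the inputs where A raises IndexError: top_index out of range for
-- final_words while at least one substitute survives the filters (so the assignment runs).
def Pre_get_replace_texts_and_available_substitutes_py (substitutes : List String) (final_words : List String) (top_index : Int) (tgt_word : String) : Prop :=
  PySem.Raise.InRange final_words.length top_index ∨
    ∀ s ∈ substitutes, s = tgt_word ∨ PySem.Set.contains pvFilterWords (PySem.Str.replace s "##" "") = true
instance (substitutes : List String) (final_words : List String) (top_index : Int) (tgt_word : String) : Decidable (Pre_get_replace_texts_and_available_substitutes_py substitutes final_words top_index tgt_word) := by unfold Pre_get_replace_texts_and_available_substitutes_py; infer_instance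

def pvWitness_get_replace_texts_and_available_substitutes_py : List String × List String × Int × String :=
  (["cat", "##dog", "the"], ["the", "mouse", "ran"], 1, "mouse")

def Spec_get_replace_texts_and_available_substitutes_py (substitutes : List String) (final_words : List String) (top_index : Int) (tgt_word : String) (out : List String × List String) : Prop := out = get_replace_texts_and_available_substitutes_py_alt substitutes final_words top_index tgt_word
instance (substitutes : List String) (final_words : List String) (top_index : Int) (tgt_word : String) (out : List String × List String) : Decidable (Spec_get_replace_texts_and_available_substitutes_py substitutes final_words top_index tgt_word out) := by unfold Spec_get_replace_texts_and_available_substitutes_py; infer_instance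

-- ===== CLAIM (what is proved, stated in full; the proofs are below) =====
def Claim_equal_get_replace_texts_and_available_substitutes_py : Prop := ∀ (substitutes : List String) (final_words : List String) (top_index : Int) (tgt_word : String), Dom_get_replace_texts_and_available_substitutes_py substitutes final_words top_index tgt_word → Pre_get_replace_texts_and_available_substitutes_py substitutes final_words top_index tgt_word → Spec_get_replace_texts_and_available_substitutes_py substitutes final_words top_index tgt_word (get_replace_texts_and_available_substitutes_py substitutes final_words top_index tgt_word)

-- ===== LEMMAS AND PROOFS =====

-- s.replace(old, new) is the identity when old does not occur in s (go-level invariant)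
theorem replace_go_no_occ (old new : List Char) (fuel : Nat) :
    ∀ (l acc : List Char), l.length ≤ fuel → ¬ old <:+: l →
      PySem.Chars.replace.go old new fuel l acc = acc.reverse ++ l := by
  induction fuel with
  | zero =>
    intro l acc hlen _
    have : l = [] := List.eq_nil_of_length_eq_zero (Nat.le_zero.mp hlen)
    subst this
    simp [PySem.Chars.replace.go]
  | succ fuel ih =>
    intro l acc hlen hocc
    cases l with
    | nil => simp [PySem.Chars.replace.go]
    | cons c t =>
      have hpre : old.isPrefixOf (c :: t) = false := by
        by_contra h
        exact hocc (List.IsPrefix.isInfix (List.isPrefixOf_iff_prefix.mp (by simpa using h)))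
      rw [PySem.Chars.replace.go]
      simp only [hpre]
      rw [ih t (c :: acc) (by simpa using Nat.le_of_succ_le_succ hlen)
        (fun h => hocc (List.infix_cons h))]
      simp

theorem replace_id_of_not_isIn (s : String) (h : PySem.Str.isIn "##" s = false) :
    PySem.Str.replace s "##" "" = s := by
  apply String.toList_inj.mp
  rw [PySem.Str.toList_replace]
  have hocc : ¬ ("##".toList) <:+: s.toList := by
    rw [← PySem.Chars.isIn_eq_false_iff]
    rw [← PySem.Str.isIn_eq]
    exact h
  show PySem.Chars.replace s.toList "##".toList "".toList = s.toList
  rw [show ("".toList : List Char) = [] from rfl]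
  rw [PySem.Chars.replace]
  simp only [show ("##".toList : List Char).isEmpty = false from rfl, Bool.false_eq_true, if_false]
  rw [replace_go_no_occ _ _ _ _ _ (le_refl _) hocc]
  simp

-- join sep (a :: m) for nonempty m
theorem chars_join_cons_ne (sp a : List Char) (m : List (List Char)) (hm : m ≠ []) :
    PySem.Chars.join sp (a :: m) = a ++ sp ++ PySem.Chars.join sp m := by
  cases m with
  | nil => exact absurd rfl hm
  | cons b r => exact PySem.Chars.join_cons_cons sp a b r

-- joining with element j replaced = head part ++ element ++ tail part
theorem chars_join_set (sp w : List Char) (ls : List (List Char)) (j : Nat) (hj : j < ls.length) :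
    PySem.Chars.join sp (ls.set j w) =
      (if 0 < j then PySem.Chars.join sp (ls.take j) ++ sp else []) ++ w ++
      (if j + 1 < ls.length then sp ++ PySem.Chars.join sp (ls.drop (j + 1)) else []) := by
  induction ls generalizing j with
  | nil => simp at hj
  | cons a t ih =>
    cases j with
    | zero =>
      cases t with
      | nil => simp [PySem.Chars.join_singleton]
      | cons b r =>
        simp only [List.set_cons_zero, PySem.Chars.join_cons_cons]
        simp [List.append_assoc]
    | succ k =>
      have hk : k < t.length := by simpa using hj
      have hset : t.set k w ≠ [] := by
        cases t with
        | nil => simp at hk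
        | cons b r => cases k <;> simp
      rw [List.set_cons_succ, chars_join_cons_ne sp a _ hset, ih k hk]
      have hlen : (k + 1 + 1 < t.length + 1) = (k + 1 < t.length) := by
        simp only [eq_iff_iff]; omega
      cases Nat.eq_zero_or_pos k with
      | inl h0 =>
        subst h0
        simp only [if_pos (Nat.zero_lt_succ 0), if_neg (lt_irrefl 0)]
        simp [List.take_succ_cons, PySem.Chars.join_singleton, List.append_assoc, hlen]
      | inr hpos =>
        have htake : t.take k ≠ [] := by
          cases t with
          | nil => simp at hk
          | cons b r => cases k with
            | zero => omega
            | succ k' => simp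
        rw [if_pos hpos, if_pos (Nat.succ_pos k)]
        rw [List.take_succ_cons, chars_join_cons_ne sp a _ (by simpa using htake)]
        simp [List.append_assoc, hlen]

-- String-level: join of l with index j set to w
theorem str_join_set (l : List String) (j : Nat) (hj : j < l.length) (w : String) :
    PySem.Str.join " " (l.set j w) =
      (if 0 < j then PySem.Str.join " " (l.take j) ++ " " else "") ++ w ++
      (if j + 1 < l.length then " " ++ PySem.Str.join " " (l.drop (j + 1)) else "") := by
  apply String.toList_inj.mp
  simp only [String.toList_append, PySem.Str.toList_join]
  rw [show (l.set j w).map String.toList = (l.map String.toList).set j w.toList from by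
    simp [List.map_set]]
  rw [chars_join_set " ".toList w.toList (l.map String.toList) j (by simpa using hj)]
  simp only [List.length_map]
  split_ifs <;> simp [String.toList_append, PySem.Str.toList_join]

-- pySetD at a negative in-range index
theorem pySetD_neg (l : List String) (t : Int) (w : String)
    (h1 : t < 0) (h2 : -(l.length : Int) ≤ t) :
    PySem.List.pySetD l t w = l.set (t + l.length).toNat w := by
  have h0 : ¬ (0 ≤ t) := by omega
  have hn : l.length - (-t).toNat = (t + l.length).toNat := by omega
  simp only [PySem.List.pySetD, PySem.List.pySet?, PySem.List.pyIdx?, h0, if_false, if_pos h2,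
    Option.map_some, Option.getD_some, hn]

-- the replacement string built for an accepted substitute, in B's head/tail form
theorem key_join (fw : List String) (ti i : Int) (w : String)
    (h0 : 0 ≤ i) (h1 : i < (fw.length : Int))
    (hset : PySem.List.pySetD fw ti w = fw.set i.toNat w) :
    PySem.Str.join " " (PySem.List.pySetD fw ti w) =
      (if 0 < i then PySem.Str.join " " (PySem.List.slice fw none (some i)) ++ " " else "") ++ w ++
      (if i + 1 < (fw.length : Int) then " " ++ PySem.Str.join " " (PySem.List.slice fw (some (i + 1)) none) else "") := by
  rw [hset, PySem.List.slice_to fw h0, PySem.List.slice_from fw (by omega : (0:Int) ≤ i + 1)]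
  have e1 : (0 < i) = (0 < i.toNat) := by simp only [eq_iff_iff]; omega
  have e2 : (i + 1 < (fw.length : Int)) = (i.toNat + 1 < fw.length) := by simp only [eq_iff_iff]; omega
  have e3 : (i + 1).toNat = i.toNat + 1 := by omega
  simp only [e1, e2, e3]
  exact str_join_set fw i.toNat (by omega) w

-- a fold whose body fixes every element of the list is the identity on the accumulator
theorem foldl_skip {α β : Type} (f : β → α → β) (l : List α)
    (h : ∀ s ∈ l, ∀ b, f b s = b) : ∀ acc, l.foldl f acc = acc := by
  induction l with
  | nil => intro acc; rfl
  | cons x t ih =>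
    intro acc
    rw [List.foldl_cons, h x (by simp), ih (fun s hs b => h s (by simp [hs]) b)]

-- ===== VERDICT (by name: the statement is the Claim_ definition above) =====
theorem get_replace_texts_and_available_substitutes_py_spec : Claim_equal_get_replace_texts_and_available_substitutes_py := by
  intro substitutes final_words top_index tgt_word _ hpre
  unfold Spec_get_replace_texts_and_available_substitutes_py
  unfold get_replace_texts_and_available_substitutes_py get_replace_texts_and_available_substitutes_py_alt
  cases hpre with
  | inl hin =>
    obtain ⟨hlo, hhi⟩ := hin
    set n : Int := (final_words.length : Int) with hn
    set i : Int := if top_index < 0 then top_index + n else top_index with hi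
    have h0 : 0 ≤ i := by rw [hi]; split_ifs <;> omega
    have h1 : i < n := by rw [hi]; split_ifs <;> omega
    have hset : ∀ w, PySem.List.pySetD final_words top_index w = final_words.set i.toNat w := by
      intro w
      by_cases hneg : top_index < 0
      · rw [hi, if_pos hneg]
        exact pySetD_neg final_words top_index w hneg hlo
      · rw [hi, if_neg hneg]
        exact PySem.List.pySetD_of_nonneg final_words w (by omega)
    apply List.foldl_ext
    intro acc s _
    by_cases heq : s == tgt_word
    · simp only [heq, if_pos]
    · simp only [heq, Bool.false_eq_true, if_false]
      have hval : (if PySem.Str.isIn "##" s then PySem.Str.replace s "##" "" else s)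
          = PySem.Str.replace s "##" "" := by
        by_cases hin2 : PySem.Str.isIn "##" s
        · rw [if_pos hin2]
        · rw [if_neg hin2, replace_id_of_not_isIn s (by simpa using hin2)]
      simp only [hval]
      by_cases hflt : PySem.Set.contains pvFilterWords (PySem.Str.replace s "##" "")
      · simp only [hflt, if_pos]
      · simp only [hflt, Bool.false_eq_true, if_false]
        rw [key_join final_words top_index i _ h0 h1 (hset _)]
  | inr hall =>
    rw [foldl_skip _ _ ?hA, foldl_skip _ _ ?hB]
    case hA =>
      intro s hs b
      rcases hall s hs with h | h
      · simp [h]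
      · by_cases heq : s == tgt_word
        · simp only [heq, if_pos]
        · simp only [heq, Bool.false_eq_true, if_false]
          have hval : (if PySem.Str.isIn "##" s then PySem.Str.replace s "##" "" else s)
              = PySem.Str.replace s "##" "" := by
            by_cases hin2 : PySem.Str.isIn "##" s
            · rw [if_pos hin2]
            · rw [if_neg hin2, replace_id_of_not_isIn s (by simpa using hin2)]
          simp only [hval, h, if_pos]
    case hB =>
      intro s hs b
      rcases hall s hs with h | h
      · simp [h]
      · by_cases heq : s == tgt_word
        · simp only [heq, if_pos]
        · simp only [heq, Bool.false_eq_true, if_false, h, if_pos]
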